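-- pv_equiv track=rewrite | github.com/tariquesani/aruuz-nigar | aruuz/utils/meter_align.py | word_boundaries_from_taqti
-- ===== SOURCE A (Python) =====
-- from typing import TYPE_CHECKING, Any, Dict, List, Optional, Tuple
--
-- def word_boundaries_from_taqti(word_taqti: List[str]) -> List[Dict[str, Any]]:
--     """
--     Build list of { word_index, code_start, code_end } from word_taqti.
--     code_end is exclusive (Python slice style).
--     """
--     boundaries: List[Dict[str, Any]] = []
--     start = 0
--     for i, code in enumerate(word_taqti):
--         end = start + len(code)
--         boundaries.append({"word_index": i, "code_start": start, "code_end": end})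
--         start = end
--     return boundaries
-- ===== SOURCE B (Python) =====
-- from typing import Any, Dict, List
--
-- def word_boundaries_from_taqti(word_taqti: List[str]) -> List[Dict[str, Any]]:
--     # Pass 1: prefix-sum offset table (one more entry than the input).
--     offsets = [0]
--     total = 0
--     for code in word_taqti:
--         total += len(code)
--         offsets.append(total)
--     # Pass 2: zip adjacent offsets into boundary records.
--     return [
--         {"word_index": i, "code_start": s, "code_end": e}
--         for i, (s, e) in enumerate(zip(offsets, offsets[1:]))
--     ]
-- ===== Notes on version B (the rewrite author's own statement) =====
-- stated objective: alternative
-- what changed: Replaces the single loop carrying a running start with two separate passes: first a prefix-sum offset table is built, then adjacent offset pairs are zipped into the boundary records.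
import Mathlib
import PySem

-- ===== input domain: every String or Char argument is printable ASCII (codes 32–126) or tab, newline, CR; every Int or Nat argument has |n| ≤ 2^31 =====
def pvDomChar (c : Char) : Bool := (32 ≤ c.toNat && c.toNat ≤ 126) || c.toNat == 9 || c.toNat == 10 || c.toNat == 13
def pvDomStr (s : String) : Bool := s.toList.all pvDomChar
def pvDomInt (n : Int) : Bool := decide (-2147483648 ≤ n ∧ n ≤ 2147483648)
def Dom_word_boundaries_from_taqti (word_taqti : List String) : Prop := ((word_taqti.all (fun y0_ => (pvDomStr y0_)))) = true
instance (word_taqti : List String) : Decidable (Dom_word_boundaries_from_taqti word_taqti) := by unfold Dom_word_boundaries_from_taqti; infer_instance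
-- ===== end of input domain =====

-- B builds a prefix-sum offset table first and then zips adjacent offsets into records,
-- instead of A's single loop carrying a running start (objective: alternative decomposition).

-- ===== PORT A =====
-- one loop over enumerate(word_taqti), accumulator (boundaries, start)
def word_boundaries_from_taqti (word_taqti : List String) : List (List (String × Int)) :=
  ((PySem.List.enumerate word_taqti).foldl
    (fun (st : List (List (String × Int)) × Int) p =>
      let e : Int := st.2 + (PySem.Str.len p.2 : Int)
      (st.1 ++ [[("word_index", p.1), ("code_start", st.2), ("code_end", e)]], e))
    ([], 0)).1

-- ===== PORT B =====
-- pass 1: offsets = [0] ++ running sums (accumulator (offsets, total))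
def wbft_offsets (word_taqti : List String) : List Int :=
  (word_taqti.foldl
    (fun (st : List Int × Int) code =>
      let t : Int := st.2 + (PySem.Str.len code : Int)
      (st.1 ++ [t], t))
    ([0], 0)).1

-- pass 2: enumerate(zip(offsets, offsets[1:])) → records
def word_boundaries_from_taqti_alt (word_taqti : List String) : List (List (String × Int)) :=
  let offsets := wbft_offsets word_taqti
  (PySem.List.enumerate (offsets.zip (PySem.List.slice offsets (some 1) none))).map
    (fun p => [("word_index", p.1), ("code_start", p.2.1), ("code_end", p.2.2)])

-- ===== PRECONDITION & SPEC =====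
def Spec_word_boundaries_from_taqti (word_taqti : List String) (out : List (List (String × Int))) : Prop := out = word_boundaries_from_taqti_alt word_taqti
instance (word_taqti : List String) (out : List (List (String × Int))) : Decidable (Spec_word_boundaries_from_taqti word_taqti out) := by unfold Spec_word_boundaries_from_taqti; infer_instance

-- ===== CLAIM (what is proved, stated in full; the proofs are below) =====
def Claim_equal_word_boundaries_from_taqti : Prop := ∀ (word_taqti : List String), Dom_word_boundaries_from_taqti word_taqti → Spec_word_boundaries_from_taqti word_taqti (word_boundaries_from_taqti word_taqti)

-- ===== LEMMAS AND PROOFS =====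

-- common recursive description: records for ws with first index i and start offset s
def wbft_go (ws : List String) (i s : Int) : List (List (String × Int)) :=
  match ws with
  | [] => []
  | c :: t =>
      [("word_index", i), ("code_start", s), ("code_end", s + (PySem.Str.len c : Int))]
        :: wbft_go t (i + 1) (s + (PySem.Str.len c : Int))

theorem wbft_A_go (ws : List String) (i s : Int) (acc : List (List (String × Int))) :
    ((PySem.List.enumerate ws i).foldl
      (fun (st : List (List (String × Int)) × Int) p =>
        let e : Int := st.2 + (PySem.Str.len p.2 : Int)
        (st.1 ++ [[("word_index", p.1), ("code_start", st.2), ("code_end", e)]], e))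
      (acc, s)).1 = acc ++ wbft_go ws i s := by
  induction ws generalizing i s acc with
  | nil => simp [PySem.List.enumerate_nil, wbft_go]
  | cons c t ih =>
      simp only [PySem.List.enumerate_cons, List.foldl_cons, wbft_go]
      rw [ih]
      simp

-- offsets table = 0 :: shifted prefix sums, described recursively
def wbft_offs_go (ws : List String) (s : Int) : List Int :=
  match ws with
  | [] => []
  | c :: t => (s + (PySem.Str.len c : Int)) :: wbft_offs_go t (s + (PySem.Str.len c : Int))

theorem wbft_offsets_go (ws : List String) (s : Int) (acc : List Int) :
    (ws.foldl
      (fun (st : List Int × Int) code =>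
        let t : Int := st.2 + (PySem.Str.len code : Int)
        (st.1 ++ [t], t))
      (acc, s)).1 = acc ++ wbft_offs_go ws s := by
  induction ws generalizing s acc with
  | nil => simp [wbft_offs_go]
  | cons c t ih =>
      simp only [List.foldl_cons, wbft_offs_go]
      rw [ih]
      simp

theorem wbft_B_go (ws : List String) (i s : Int) :
    (PySem.List.enumerate ((s :: wbft_offs_go ws s).zip (wbft_offs_go ws s)) i).map
      (fun p => [("word_index", p.1), ("code_start", p.2.1), ("code_end", p.2.2)])
      = wbft_go ws i s := by
  induction ws generalizing i s with
  | nil => simp [wbft_offs_go, wbft_go, PySem.List.enumerate_nil]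
  | cons c t ih =>
      simp only [wbft_offs_go, wbft_go, List.zip_cons_cons, PySem.List.enumerate_cons,
        List.map_cons]
      rw [ih]

theorem wbft_slice_tail (xs : List Int) :
    PySem.List.slice xs (some 1) none = xs.drop 1 := by
  simpa using PySem.List.slice_from_one xs

-- ===== VERDICT (by name: the statement is the Claim_ definition above) =====
theorem word_boundaries_from_taqti_spec : Claim_equal_word_boundaries_from_taqti := by
  intro ws _
  show word_boundaries_from_taqti ws = word_boundaries_from_taqti_alt ws
  unfold word_boundaries_from_taqti word_boundaries_from_taqti_alt wbft_offsets
  rw [wbft_A_go, wbft_offsets_go]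
  simp only [List.nil_append, List.singleton_append, wbft_slice_tail, List.drop_succ_cons,
    List.drop_zero]
  exact (wbft_B_go ws 0 0).symm
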